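-- pv_equiv track=rewrite | github.com/LilianeAquino/aed_projeto_3 | modules/data.py | convertDiagnosis
-- ===== SOURCE A (Python) =====
-- def convertDiagnosis(data, col):
--     for i in range(len(data[col])):
--         if data[col][i] == 0:
--             data[col][i] = 18
--
--         elif data[col][i] == -1:
--             data[col][i] = 19
--
--         elif data[col][i] <= 139:
--             data[col][i] = 1
--
--         elif data[col][i] <= 239:
--             data[col][i] = 2
--
--         elif data[col][i] <= 279:
--             data[col][i] = 3
--
--         elif data[col][i] <= 289:
--             data[col][i] = 4
--
--         elif data[col][i] <= 319:
--             data[col][i] = 5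
--
--         elif data[col][i] <= 389:
--             data[col][i] = 6
--
--         elif data[col][i] <= 459:
--             data[col][i] = 7
--
--         elif data[col][i] <= 519:
--             data[col][i] = 8
--
--         elif data[col][i] <= 579:
--             data[col][i] = 9
--
--         elif data[col][i] <= 629:
--             data[col][i] = 10
--
--         elif data[col][i] <= 679:
--             data[col][i] = 11
--
--         elif data[col][i] <= 709:
--             data[col][i] = 12
--
--         elif data[col][i] <= 739:
--             data[col][i] = 13
--
--         elif data[col][i] <= 759:
--             data[col][i] = 14
--
--         elif data[col][i] <= 779:
--             data[col][i] = 15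
--
--         elif data[col][i] <= 799:
--             data[col][i] = 16
--
--         else:
--             data[col][i] = 17
--
--     return data
-- ===== SOURCE B (Python) =====
-- # Decade lookup table: since every cutoff ends in 9, the bin of a value depends only
-- # on its decade q = v // 10; an 80-entry table (built once from run lengths) is indexed
-- # directly, with range clamps (q < 0 -> bin 1, q >= 80 -> bin 17) and the sentinels
-- # 0 -> 18, -1 -> 19 checked first.
-- # Note on side effects: A mutates the stored list element by element; B rebinds
-- # data[col] to a new list (the returned dict is identical).
--
-- _RUNS = [(14, 1), (10, 2), (4, 3), (1, 4), (3, 5), (7, 6), (7, 7), (6, 8),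
--          (6, 9), (5, 10), (5, 11), (3, 12), (3, 13), (2, 14), (2, 15), (2, 16)]
-- _TABLE = [label for count, label in _RUNS for _ in range(count)]
--
--
-- def _bin(v):
--     if v == 0:
--         return 18
--     if v == -1:
--         return 19
--     q = v // 10
--     if q < 0:
--         return 1
--     if q >= 80:
--         return 17
--     return _TABLE[q]
--
--
-- def convertDiagnosis(data, col):
--     data[col] = [_bin(v) for v in data[col]]
--     return data
-- ===== Notes on version B (the rewrite author's own statement) =====
-- stated objective: alternative
-- what changed: Replaces the 17-branch comparison chain by a direct-indexed 80-entry decade lookup table: after the 0/-1 sentinel checks the bin is _TABLE[v // 10] (with q<0 and q>=80 clamped to bins 1 and 17), computed in one comprehension that rebinds data[col]; correct because every cutoff ends in 9, so the bin depends only on the decade.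
import Mathlib
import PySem

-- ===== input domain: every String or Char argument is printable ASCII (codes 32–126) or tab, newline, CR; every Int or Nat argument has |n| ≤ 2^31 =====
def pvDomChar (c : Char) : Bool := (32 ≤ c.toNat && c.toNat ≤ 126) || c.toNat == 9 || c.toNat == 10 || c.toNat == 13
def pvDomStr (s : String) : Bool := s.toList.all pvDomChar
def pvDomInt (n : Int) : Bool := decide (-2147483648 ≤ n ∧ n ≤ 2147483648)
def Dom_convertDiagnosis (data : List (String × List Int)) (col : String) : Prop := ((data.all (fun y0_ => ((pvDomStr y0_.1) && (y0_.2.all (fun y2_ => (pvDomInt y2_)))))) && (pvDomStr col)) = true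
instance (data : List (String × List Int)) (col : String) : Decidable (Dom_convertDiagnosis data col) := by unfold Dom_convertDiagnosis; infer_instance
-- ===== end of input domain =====

-- B replaces A's 17-branch elif chain by a direct-indexed 80-entry decade lookup table
-- (bin = table[v // 10] after the 0/-1 sentinel checks, with q<0 / q>=80 clamped to 1 / 17);
-- objective: alternative. Return-value equivalence only: A mutates the stored list element
-- by element, B rebinds data[col] to a new list.


-- ===== PORT A =====
-- A's elif chain over data[col][i], verbatim.
def aClassify (v : Int) : Int :=
  if v = 0 then 18
  else if v = -1 then 19
  else if v ≤ 139 then 1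
  else if v ≤ 239 then 2
  else if v ≤ 279 then 3
  else if v ≤ 289 then 4
  else if v ≤ 319 then 5
  else if v ≤ 389 then 6
  else if v ≤ 459 then 7
  else if v ≤ 519 then 8
  else if v ≤ 579 then 9
  else if v ≤ 629 then 10
  else if v ≤ 679 then 11
  else if v ≤ 709 then 12
  else if v ≤ 739 then 13
  else if v ≤ 759 then 14
  else if v ≤ 779 then 15
  else if v ≤ 799 then 16
  else 17

-- for i in range(len(data[col])): data[col][i] = <chain>; return data
def convertDiagnosis (data : List (String × List Int)) (col : String) : List (String × List Int) :=
  let d0 : PySem.Dict String (List Int) := PySem.Dict.mk data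
  ((PySem.List.pyRange 0 ((PySem.Dict.getD d0 col []).length : Int) 1).foldl
      (fun d i =>
        let xs := PySem.Dict.getD d col []
        PySem.Dict.insert d col
          (PySem.List.pySetD xs i (aClassify (PySem.List.pyGetD xs i 0))))
      d0).items

-- ===== PORT B =====
-- _RUNS / _TABLE from Source B: an 80-entry decade table built from run lengths
def bRuns : List (Nat × Int) :=
  [(14, 1), (10, 2), (4, 3), (1, 4), (3, 5), (7, 6), (7, 7), (6, 8),
   (6, 9), (5, 10), (5, 11), (3, 12), (3, 13), (2, 14), (2, 15), (2, 16)]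
def bTable : List Int := bRuns.flatMap (fun p => List.replicate p.1 p.2)

def bClassify (v : Int) : Int :=
  if v = 0 then 18
  else if v = -1 then 19
  else
    let q := PySem.Int.floordiv v 10
    if q < 0 then 1
    else if 80 ≤ q then 17
    else PySem.List.pyGetD bTable q 0

-- data[col] = [_bin(v) for v in data[col]]; return data
def convertDiagnosis_alt (data : List (String × List Int)) (col : String) : List (String × List Int) :=
  let d : PySem.Dict String (List Int) := PySem.Dict.mk data
  (PySem.Dict.insert d col ((PySem.Dict.getD d col []).map bClassify)).items

-- ===== PRECONDITION & SPEC =====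
-- Pre_ requires col to be a key (Python raises KeyError otherwise) and the keys to be
-- distinct: an association list with duplicate keys represents no Python dict (a dict
-- literal collapses duplicates), and the two ports' overwrite behaviour on such lists
-- is accidental.
def Pre_convertDiagnosis (data : List (String × List Int)) (col : String) : Prop :=
  (data.map Prod.fst).Nodup ∧ col ∈ data.map Prod.fst
instance (data : List (String × List Int)) (col : String) : Decidable (Pre_convertDiagnosis data col) := by unfold Pre_convertDiagnosis; infer_instance

def pvWitness_convertDiagnosis : (List (String × List Int)) × String :=
  ([("diag", [0, -1, 139, 140, 800]), ("other", [3])], "diag")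

def Spec_convertDiagnosis (data : List (String × List Int)) (col : String) (out : List (String × List Int)) : Prop := out = convertDiagnosis_alt data col
instance (data : List (String × List Int)) (col : String) (out : List (String × List Int)) : Decidable (Spec_convertDiagnosis data col out) := by unfold Spec_convertDiagnosis; infer_instance

-- ===== CLAIM (what is proved, stated in full; the proofs are below) =====
def Claim_equal_convertDiagnosis : Prop := ∀ (data : List (String × List Int)) (col : String), Dom_convertDiagnosis data col → Pre_convertDiagnosis data col → Spec_convertDiagnosis data col (convertDiagnosis data col)

-- ===== LEMMAS AND PROOFS =====

-- the decade table's entry at n equals the run-structured chain on n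
lemma table_val : ∀ n : Nat, n < 80 → bTable.getD n 0 =
    (if n ≤ 13 then (1 : Int) else if n ≤ 23 then 2 else if n ≤ 27 then 3
     else if n ≤ 28 then 4 else if n ≤ 31 then 5 else if n ≤ 38 then 6
     else if n ≤ 45 then 7 else if n ≤ 51 then 8 else if n ≤ 57 then 9
     else if n ≤ 62 then 10 else if n ≤ 67 then 11 else if n ≤ 70 then 12
     else if n ≤ 73 then 13 else if n ≤ 75 then 14 else if n ≤ 77 then 15
     else 16) := by decide

-- pointwise: the elif chain equals the decade-table lookup
set_option maxHeartbeats 1000000 in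
lemma classify_eq (v : Int) : aClassify v = bClassify v := by
  unfold aClassify bClassify
  by_cases h0 : v = 0
  · simp [h0]
  by_cases h1 : v = -1
  · simp [h1]
  rw [if_neg h0, if_neg h1, if_neg h0, if_neg h1]
  simp only [PySem.Int.floordiv_eq_ediv_of_pos (show (0:Int) < 10 by norm_num)]
  by_cases hneg : v / 10 < 0
  · rw [if_pos hneg, if_pos (show v ≤ 139 by omega)]
  rw [if_neg hneg]
  by_cases hbig : (80 : Int) ≤ v / 10
  · rw [if_pos hbig]
    rw [if_neg (show ¬ v ≤ 139 by omega), if_neg (show ¬ v ≤ 239 by omega),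
        if_neg (show ¬ v ≤ 279 by omega), if_neg (show ¬ v ≤ 289 by omega),
        if_neg (show ¬ v ≤ 319 by omega), if_neg (show ¬ v ≤ 389 by omega),
        if_neg (show ¬ v ≤ 459 by omega), if_neg (show ¬ v ≤ 519 by omega),
        if_neg (show ¬ v ≤ 579 by omega), if_neg (show ¬ v ≤ 629 by omega),
        if_neg (show ¬ v ≤ 679 by omega), if_neg (show ¬ v ≤ 709 by omega),
        if_neg (show ¬ v ≤ 739 by omega), if_neg (show ¬ v ≤ 759 by omega),
        if_neg (show ¬ v ≤ 779 by omega), if_neg (show ¬ v ≤ 799 by omega)]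
  rw [if_neg hbig]
  have hcast : (((v / 10).toNat : Nat) : Int) = v / 10 := Int.toNat_of_nonneg (by omega)
  rw [← hcast, PySem.List.pyGetD_natCast, table_val _ (by omega)]
  by_cases c139 : v ≤ 139
  · rw [if_pos c139, if_pos (show (v / 10).toNat ≤ 13 by omega)]
  rw [if_neg c139, if_neg (show ¬ (v / 10).toNat ≤ 13 by omega)]
  by_cases c239 : v ≤ 239
  · rw [if_pos c239, if_pos (show (v / 10).toNat ≤ 23 by omega)]
  rw [if_neg c239, if_neg (show ¬ (v / 10).toNat ≤ 23 by omega)]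
  by_cases c279 : v ≤ 279
  · rw [if_pos c279, if_pos (show (v / 10).toNat ≤ 27 by omega)]
  rw [if_neg c279, if_neg (show ¬ (v / 10).toNat ≤ 27 by omega)]
  by_cases c289 : v ≤ 289
  · rw [if_pos c289, if_pos (show (v / 10).toNat ≤ 28 by omega)]
  rw [if_neg c289, if_neg (show ¬ (v / 10).toNat ≤ 28 by omega)]
  by_cases c319 : v ≤ 319
  · rw [if_pos c319, if_pos (show (v / 10).toNat ≤ 31 by omega)]
  rw [if_neg c319, if_neg (show ¬ (v / 10).toNat ≤ 31 by omega)]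
  by_cases c389 : v ≤ 389
  · rw [if_pos c389, if_pos (show (v / 10).toNat ≤ 38 by omega)]
  rw [if_neg c389, if_neg (show ¬ (v / 10).toNat ≤ 38 by omega)]
  by_cases c459 : v ≤ 459
  · rw [if_pos c459, if_pos (show (v / 10).toNat ≤ 45 by omega)]
  rw [if_neg c459, if_neg (show ¬ (v / 10).toNat ≤ 45 by omega)]
  by_cases c519 : v ≤ 519
  · rw [if_pos c519, if_pos (show (v / 10).toNat ≤ 51 by omega)]
  rw [if_neg c519, if_neg (show ¬ (v / 10).toNat ≤ 51 by omega)]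
  by_cases c579 : v ≤ 579
  · rw [if_pos c579, if_pos (show (v / 10).toNat ≤ 57 by omega)]
  rw [if_neg c579, if_neg (show ¬ (v / 10).toNat ≤ 57 by omega)]
  by_cases c629 : v ≤ 629
  · rw [if_pos c629, if_pos (show (v / 10).toNat ≤ 62 by omega)]
  rw [if_neg c629, if_neg (show ¬ (v / 10).toNat ≤ 62 by omega)]
  by_cases c679 : v ≤ 679
  · rw [if_pos c679, if_pos (show (v / 10).toNat ≤ 67 by omega)]
  rw [if_neg c679, if_neg (show ¬ (v / 10).toNat ≤ 67 by omega)]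
  by_cases c709 : v ≤ 709
  · rw [if_pos c709, if_pos (show (v / 10).toNat ≤ 70 by omega)]
  rw [if_neg c709, if_neg (show ¬ (v / 10).toNat ≤ 70 by omega)]
  by_cases c739 : v ≤ 739
  · rw [if_pos c739, if_pos (show (v / 10).toNat ≤ 73 by omega)]
  rw [if_neg c739, if_neg (show ¬ (v / 10).toNat ≤ 73 by omega)]
  by_cases c759 : v ≤ 759
  · rw [if_pos c759, if_pos (show (v / 10).toNat ≤ 75 by omega)]
  rw [if_neg c759, if_neg (show ¬ (v / 10).toNat ≤ 75 by omega)]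
  by_cases c779 : v ≤ 779
  · rw [if_pos c779, if_pos (show (v / 10).toNat ≤ 77 by omega)]
  rw [if_neg c779, if_neg (show ¬ (v / 10).toNat ≤ 77 by omega)]
  rw [if_pos (show v ≤ 799 by omega)]

-- overwriting a present key with its own stored value is the identity (keys distinct)
lemma insert_getD_self {ν : Type} (d : PySem.Dict String ν) (k : String) (dflt : ν)
    (hc : d.contains k = true) (hnd : d.keys.Nodup) :
    d.insert k (d.getD k dflt) = d := by
  apply PySem.Dict.ext
  rw [PySem.Dict.items_insert_of_contains d _ hc]
  have : ∀ p ∈ d.items, (if (p.1 == k) = true then (k, d.getD k dflt) else p) = p := by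
    intro p hp
    by_cases h : (p.1 == k) = true
    · simp only [if_pos h]
      have hk : p.1 = k := by simpa using h
      have : d.getD k dflt = p.2 := by
        subst hk
        exact PySem.Dict.getD_of_mem_items d (by simpa using hp) hnd dflt
      rw [this, ← hk]
    · simp [h]
  calc d.items.map _ = d.items.map id := List.map_congr_left this
    _ = d.items := List.map_id d.items

-- the A-loop from index k onward maps aClassify over the tail of the stored list
lemma loopA (col : String) : ∀ (m k : Nat) (d : PySem.Dict String (List Int)) (ys : List Int),
    ys.length = k + m → PySem.Dict.getD d col [] = ys → d.contains col = true → d.keys.Nodup →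
    (PySem.List.pyRange (k : Int) (ys.length : Int) 1).foldl
        (fun d i =>
          let xs := PySem.Dict.getD d col []
          PySem.Dict.insert d col
            (PySem.List.pySetD xs i (aClassify (PySem.List.pyGetD xs i 0))))
        d
      = PySem.Dict.insert d col (ys.take k ++ (ys.drop k).map aClassify) := by
  intro m
  induction m with
  | zero =>
      intro k d ys hlen hget hc hnd
      rw [PySem.List.pyRange_one_eq_nil (by omega)]
      simp only [List.foldl_nil]
      rw [List.take_of_length_le (by omega), List.drop_eq_nil_of_le (by omega)]
      simp only [List.map_nil, List.append_nil]
      rw [← hget, insert_getD_self d col [] hc hnd]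
  | succ m ih =>
      intro k d ys hlen hget hc hnd
      have hk : k < ys.length := by omega
      rw [PySem.List.pyRange_one_cons (by exact_mod_cast hk)]
      simp only [List.foldl_cons]
      rw [hget]
      have hget' : PySem.List.pyGetD ys (k : Int) 0 = ys[k] := by
        rw [PySem.List.pyGetD_natCast, List.getD_eq_getElem ys 0 hk]
      have hset : PySem.List.pySetD ys (k : Int) (aClassify (PySem.List.pyGetD ys (k : Int) 0))
          = ys.set k (aClassify ys[k]) := by
        rw [hget', PySem.List.pySetD_natCast]
      rw [hset]
      set ys' := ys.set k (aClassify ys[k]) with hys'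
      set d' := PySem.Dict.insert d col ys' with hd'
      have hlen' : ys'.length = ys.length := by simp [hys']
      have h1 : ((k : Int) + 1) = ((k + 1 : Nat) : Int) := by push_cast; ring
      have h2 : (ys.length : Int) = (ys'.length : Int) := by rw [hlen']
      rw [h1, h2]
      rw [ih (k + 1) d' ys' (by omega) (by rw [hd']; exact PySem.Dict.getD_insert_self d col ys' [])
            (PySem.Dict.contains_insert_self d col ys') (PySem.Dict.nodup_keys_insert d col ys' hnd)]
      rw [hd', PySem.Dict.insert_insert_self]
      congr 1
      have hys'' : ys' = ys.take k ++ aClassify ys[k] :: ys.drop (k + 1) := by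
        rw [hys', List.set_eq_take_append_cons_drop, if_pos hk]
      have hlk : (ys.take k).length = k := by simp; omega
      have hdropk : ys.drop k = ys[k] :: ys.drop (k + 1) := List.drop_eq_getElem_cons hk
      rw [hys'', hdropk]
      rw [List.take_append, List.drop_append, hlk]
      simp only [List.map_cons]
      rw [List.take_of_length_le (by omega)]
      simp [List.append_assoc]

-- ===== VERDICT (by name: the statement is the Claim_ definition above) =====
theorem convertDiagnosis_spec : Claim_equal_convertDiagnosis := by
  intro data col _ hpre
  obtain ⟨hnd, hmem⟩ := hpre
  unfold Spec_convertDiagnosis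
  simp only [convertDiagnosis, convertDiagnosis_alt]
  have hnd' : (PySem.Dict.mk data).keys.Nodup := by rw [PySem.Dict.keys_mk]; exact hnd
  have hc : (PySem.Dict.mk data).contains col = true := by
    rw [PySem.Dict.contains_iff_mem_keys, PySem.Dict.keys_mk]; exact hmem
  have h := loopA col (PySem.Dict.getD (PySem.Dict.mk data) col []).length 0
      (PySem.Dict.mk data) (PySem.Dict.getD (PySem.Dict.mk data) col []) (by omega) rfl hc hnd'
  simp only [Nat.cast_zero] at h
  rw [h]
  simp only [List.take_zero, List.drop_zero, List.nil_append]
  rw [List.map_congr_left (fun v _ => classify_eq v)]
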